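-- pv_equiv track=rewrite | github.com/ManikantaSanjay/load_tester | load_patterns.py | compute_load_schedule
-- ===== SOURCE A (Python) =====
-- def compute_load_schedule(pattern, qps, duration, concurrency, spike_duration=None, spike_load=None, spike_interval=None):
--     if pattern == "steady":
--         return [qps] * duration
--     elif pattern == "spike":
--         normal_duration = (duration - spike_duration) // 2
--         spike_load_schedule = [qps] * normal_duration + [spike_load] * spike_duration + [qps] * normal_duration
--         return spike_load_schedule[:duration]
--     elif pattern == "periodic":
--         load = []
--         while len(load) < duration:
--             load += [qps] * (spike_interval - spike_duration) + [spike_load] * spike_duration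
--         return load[:duration]
--     else:
--         raise ValueError("Unsupported load pattern")
-- ===== SOURCE B (Python) =====
-- def compute_load_schedule(pattern, qps, duration, concurrency, spike_duration=None, spike_load=None, spike_interval=None):
--     if pattern == "steady":
--         return [qps] * duration
--     if pattern == "spike":
--         n0 = max((duration - spike_duration) // 2, 0)
--         s = max(spike_duration, 0)
--         m = min(2 * n0 + s, duration)
--         return [spike_load if n0 <= i < n0 + s else qps for i in range(m)]
--     if pattern == "periodic":
--         if duration <= 0:
--             return []
--         q = max(spike_interval - spike_duration, 0)
--         cycle = q + max(spike_duration, 0)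
--         return [qps if i % cycle < q else spike_load for i in range(duration)]
--     raise ValueError("Unsupported load pattern")
-- ===== Notes on version B (the rewrite author's own statement) =====
-- stated objective: alternative
-- what changed: B builds the spike and periodic schedules directly per second (position/modulo arithmetic over range(duration)) instead of A's concatenate-blocks-then-slice and grow-whole-cycles-until-long-enough-then-truncate constructions.
-- intended difference: On 'spike' calls with negative duration whose built block list is longer than -duration, A's [:duration] slice truncates from the end and returns a non-empty schedule, while B returns the empty schedule, the intended result for a non-positive duration. — e.g. on compute_load_schedule("spike", 5, -1, 1, some 2, some 9, none): A returns [9], B returns []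
import Mathlib
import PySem

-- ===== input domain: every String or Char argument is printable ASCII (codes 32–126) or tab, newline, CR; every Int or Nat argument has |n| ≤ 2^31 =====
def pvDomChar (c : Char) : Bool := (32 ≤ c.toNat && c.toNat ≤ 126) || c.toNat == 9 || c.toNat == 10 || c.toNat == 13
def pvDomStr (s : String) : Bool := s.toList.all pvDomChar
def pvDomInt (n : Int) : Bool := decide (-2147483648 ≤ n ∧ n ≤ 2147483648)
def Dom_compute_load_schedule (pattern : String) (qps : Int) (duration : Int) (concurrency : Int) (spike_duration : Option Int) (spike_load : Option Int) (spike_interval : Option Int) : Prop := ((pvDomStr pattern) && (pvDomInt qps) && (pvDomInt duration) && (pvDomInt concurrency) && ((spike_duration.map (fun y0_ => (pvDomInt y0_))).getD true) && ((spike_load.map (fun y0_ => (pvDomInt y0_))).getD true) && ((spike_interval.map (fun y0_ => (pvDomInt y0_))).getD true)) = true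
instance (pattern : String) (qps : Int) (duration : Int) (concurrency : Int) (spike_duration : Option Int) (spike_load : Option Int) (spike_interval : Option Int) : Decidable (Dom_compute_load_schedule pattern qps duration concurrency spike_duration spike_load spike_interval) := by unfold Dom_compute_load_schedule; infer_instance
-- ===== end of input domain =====

-- B replaces A's concatenate-blocks-then-slice / grow-cycles-then-truncate construction by a direct
-- per-second (index/modulo) construction; on 'spike' with negative duration B intentionally returns []
-- where A's end-relative slice can return a non-empty list (see D_ below).
-- A mutates nothing; equivalence is about the return value.

-- ===== PORT A =====
-- the Python while-loop 'while len(load) < duration: load += cycle'; fuel duration.toNat suffices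
-- because Pre_ guarantees a nonempty cycle, so each pass adds at least one element
def pvLoopA (cycle : List Int) (duration : Int) : Nat → List Int → List Int
  | 0, load => load
  | fuel+1, load =>
    if (load.length : Int) < duration then pvLoopA cycle duration fuel (load ++ cycle) else load

def compute_load_schedule (pattern : String) (qps : Int) (duration : Int) (concurrency : Int) (spike_duration : Option Int) (spike_load : Option Int) (spike_interval : Option Int) : List Int :=
  if pattern = "steady" then
    PySem.List.pyRepeat [qps] duration
  else if pattern = "spike" then
    -- Pre_ guarantees spike_duration (and, where its value can be reached, spike_load) is present;
    -- .getD 0 stands for the Python value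
    let sd := spike_duration.getD 0
    let sl := spike_load.getD 0
    let normal_duration := PySem.Int.floordiv (duration - sd) 2
    let spike_load_schedule :=
      PySem.List.pyRepeat [qps] normal_duration ++ PySem.List.pyRepeat [sl] sd ++
        PySem.List.pyRepeat [qps] normal_duration
    PySem.List.slice spike_load_schedule none (some duration)
  else if pattern = "periodic" then
    let sd := spike_duration.getD 0
    let sl := spike_load.getD 0
    let si := spike_interval.getD 0
    let cycle := PySem.List.pyRepeat [qps] (si - sd) ++ PySem.List.pyRepeat [sl] sd
    PySem.List.slice (pvLoopA cycle duration duration.toNat []) none (some duration)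
  else []  -- Python raises ValueError here; excluded by Pre_

-- ===== PORT B =====
def compute_load_schedule_alt (pattern : String) (qps : Int) (duration : Int) (concurrency : Int) (spike_duration : Option Int) (spike_load : Option Int) (spike_interval : Option Int) : List Int :=
  if pattern = "steady" then
    PySem.List.pyRepeat [qps] duration
  else if pattern = "spike" then
    let sd := spike_duration.getD 0
    let sl := spike_load.getD 0
    let n0 := max (PySem.Int.floordiv (duration - sd) 2) 0
    let s := max sd 0
    let m := min (2 * n0 + s) duration
    (PySem.List.pyRange 0 m 1).map (fun i => if n0 ≤ i ∧ i < n0 + s then sl else qps)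
  else if pattern = "periodic" then
    if duration ≤ 0 then []
    else
      let sd := spike_duration.getD 0
      let sl := spike_load.getD 0
      let si := spike_interval.getD 0
      let q := max (si - sd) 0
      let cyc := q + max sd 0
      (PySem.List.pyRange 0 duration 1).map (fun i => if PySem.Int.mod i cyc < q then qps else sl)
  else []  -- Python raises ValueError here; excluded by Pre_

-- ===== PRECONDITION & SPEC =====
-- Pre_ excludes exactly the inputs where the Python A does not return a list of ints: unknown
-- patterns (ValueError), 'spike'/'periodic' without the spike parameters the branch's arithmetic
-- touches (TypeError), 'periodic' with duration > 0 and an empty cycle (infinite loop), and calls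
-- with spike_load=None whose positive spike_duration segment survives the final slice (the result
-- then contains None, not an int).
def Pre_compute_load_schedule (pattern : String) (qps : Int) (duration : Int) (concurrency : Int) (spike_duration : Option Int) (spike_load : Option Int) (spike_interval : Option Int) : Prop :=
  if pattern = "steady" then True
  else if pattern = "spike" then
    spike_duration.isSome ∧
      (spike_load.isSome ∨ spike_duration.getD 0 ≤ 0 ∨
        (duration ≤ 0 ∧ (duration = 0 ∨
          max (PySem.Int.floordiv (duration - spike_duration.getD 0) 2) 0 +
            spike_duration.getD 0 + duration ≤ 0)))
  else if pattern = "periodic" then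
    duration ≤ 0 ∨
      (spike_duration.isSome ∧ spike_interval.isSome ∧
        (0 < spike_interval.getD 0 - spike_duration.getD 0 ∨ 0 < spike_duration.getD 0) ∧
        (0 < spike_duration.getD 0 →
          (duration ≤ spike_interval.getD 0 - spike_duration.getD 0 ∨ spike_load.isSome)))
  else False

instance (pattern : String) (qps : Int) (duration : Int) (concurrency : Int) (spike_duration : Option Int) (spike_load : Option Int) (spike_interval : Option Int) : Decidable (Pre_compute_load_schedule pattern qps duration concurrency spike_duration spike_load spike_interval) := by unfold Pre_compute_load_schedule; infer_instance

def pvWitness_compute_load_schedule : String × Int × Int × Int × Option Int × Option Int × Option Int :=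
  ("periodic", 2, 5, 1, some 1, some 9, some 3)

-- On 'spike' calls with negative duration whose built block list is longer than -duration, A's
-- [:duration] slice truncates from the end and returns a non-empty schedule, while B returns the
-- empty schedule, the intended result for a non-positive duration.
def D_compute_load_schedule (pattern : String) (qps : Int) (duration : Int) (concurrency : Int) (spike_duration : Option Int) (spike_load : Option Int) (spike_interval : Option Int) : Prop :=
  pattern = "spike" ∧ duration < 0 ∧ spike_duration.isSome ∧
    -duration < 2 * max (PySem.Int.floordiv (duration - spike_duration.getD 0) 2) 0 +
      max (spike_duration.getD 0) 0

instance (pattern : String) (qps : Int) (duration : Int) (concurrency : Int) (spike_duration : Option Int) (spike_load : Option Int) (spike_interval : Option Int) : Decidable (D_compute_load_schedule pattern qps duration concurrency spike_duration spike_load spike_interval) := by unfold D_compute_load_schedule; infer_instance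

def Spec_compute_load_schedule (pattern : String) (qps : Int) (duration : Int) (concurrency : Int) (spike_duration : Option Int) (spike_load : Option Int) (spike_interval : Option Int) (out : List Int) : Prop := ¬ D_compute_load_schedule pattern qps duration concurrency spike_duration spike_load spike_interval → out = compute_load_schedule_alt pattern qps duration concurrency spike_duration spike_load spike_interval
instance (pattern : String) (qps : Int) (duration : Int) (concurrency : Int) (spike_duration : Option Int) (spike_load : Option Int) (spike_interval : Option Int) (out : List Int) : Decidable (Spec_compute_load_schedule pattern qps duration concurrency spike_duration spike_load spike_interval out) := by unfold Spec_compute_load_schedule; infer_instance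

def pvDiffWitness_compute_load_schedule : String × Int × Int × Int × Option Int × Option Int × Option Int :=
  ("spike", 5, -1, 1, some 2, some 9, none)

def pvDiffWitnessOut_compute_load_schedule : (List Int) × (List Int) := ([9], [])

-- ===== CLAIM (what is proved, stated in full; the proofs are below) =====
def Claim_unchanged_compute_load_schedule : Prop := ∀ (pattern : String) (qps : Int) (duration : Int) (concurrency : Int) (spike_duration : Option Int) (spike_load : Option Int) (spike_interval : Option Int), Dom_compute_load_schedule pattern qps duration concurrency spike_duration spike_load spike_interval → Pre_compute_load_schedule pattern qps duration concurrency spike_duration spike_load spike_interval → Spec_compute_load_schedule pattern qps duration concurrency spike_duration spike_load spike_interval (compute_load_schedule pattern qps duration concurrency spike_duration spike_load spike_interval)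
def Claim_changed_compute_load_schedule : Prop := Dom_compute_load_schedule (pvDiffWitness_compute_load_schedule.1) (pvDiffWitness_compute_load_schedule.2.1) (pvDiffWitness_compute_load_schedule.2.2.1) (pvDiffWitness_compute_load_schedule.2.2.2.1) (pvDiffWitness_compute_load_schedule.2.2.2.2.1) (pvDiffWitness_compute_load_schedule.2.2.2.2.2.1) (pvDiffWitness_compute_load_schedule.2.2.2.2.2.2) ∧ Pre_compute_load_schedule (pvDiffWitness_compute_load_schedule.1) (pvDiffWitness_compute_load_schedule.2.1) (pvDiffWitness_compute_load_schedule.2.2.1) (pvDiffWitness_compute_load_schedule.2.2.2.1) (pvDiffWitness_compute_load_schedule.2.2.2.2.1) (pvDiffWitness_compute_load_schedule.2.2.2.2.2.1) (pvDiffWitness_compute_load_schedule.2.2.2.2.2.2) ∧ D_compute_load_schedule (pvDiffWitness_compute_load_schedule.1) (pvDiffWitness_compute_load_schedule.2.1) (pvDiffWitness_compute_load_schedule.2.2.1) (pvDiffWitness_compute_load_schedule.2.2.2.1) (pvDiffWitness_compute_load_schedule.2.2.2.2.1) (pvDiffWitness_compute_load_schedule.2.2.2.2.2.1) (pvDiffWitness_compute_load_schedule.2.2.2.2.2.2)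 ∧ compute_load_schedule (pvDiffWitness_compute_load_schedule.1) (pvDiffWitness_compute_load_schedule.2.1) (pvDiffWitness_compute_load_schedule.2.2.1) (pvDiffWitness_compute_load_schedule.2.2.2.1) (pvDiffWitness_compute_load_schedule.2.2.2.2.1) (pvDiffWitness_compute_load_schedule.2.2.2.2.2.1) (pvDiffWitness_compute_load_schedule.2.2.2.2.2.2) = pvDiffWitnessOut_compute_load_schedule.1 ∧ compute_load_schedule_alt (pvDiffWitness_compute_load_schedule.1) (pvDiffWitness_compute_load_schedule.2.1) (pvDiffWitness_compute_load_schedule.2.2.1) (pvDiffWitness_compute_load_schedule.2.2.2.1) (pvDiffWitness_compute_load_schedule.2.2.2.2.1) (pvDiffWitness_compute_load_schedule.2.2.2.2.2.1) (pvDiffWitness_compute_load_schedule.2.2.2.2.2.2) = pvDiffWitnessOut_compute_load_schedule.2 ∧ pvDiffWitnessOut_compute_load_schedule.1 ≠ pvDiffWitnessOut_compute_load_schedule.2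
def Claim_exact_compute_load_schedule : Prop := ∀ (pattern : String) (qps : Int) (duration : Int) (concurrency : Int) (spike_duration : Option Int) (spike_load : Option Int) (spike_interval : Option Int), Dom_compute_load_schedule pattern qps duration concurrency spike_duration spike_load spike_interval → Pre_compute_load_schedule pattern qps duration concurrency spike_duration spike_load spike_interval → D_compute_load_schedule pattern qps duration concurrency spike_duration spike_load spike_interval → compute_load_schedule pattern qps duration concurrency spike_duration spike_load spike_interval ≠ compute_load_schedule_alt pattern qps duration concurrency spike_duration spike_load spike_interval

-- ===== LEMMAS AND PROOFS =====

lemma pv_spike_take (a b : Nat) (dInt : Int) (x y : Int) (hd : 0 ≤ dInt) :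
    PySem.List.slice (List.replicate a x ++ List.replicate b y ++ List.replicate a x) none (some dInt)
      = (PySem.List.pyRange 0 (min (2*(a:Int)+(b:Int)) dInt) 1).map
          (fun i => if (a:Int) ≤ i ∧ i < (a:Int)+(b:Int) then y else x) := by
  rw [PySem.List.slice_to _ hd, PySem.List.pyRange_one]
  apply List.ext_getElem
  · simp; omega
  · intro i h1 h2
    simp only [List.getElem_take, List.getElem_map, List.getElem_range,
      List.getElem_append, List.getElem_replicate, List.length_replicate, List.length_append]
    simp at h1 h2
    split_ifs <;> (try rfl) <;> omega

lemma pvLoopA_getElem? (C : List Int) (hC : 0 < C.length) (dInt : Int) :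
    ∀ (fuel : Nat) (load : List Int), dInt ≤ (load.length : Int) + (fuel * C.length : Nat) →
      ∀ i : Nat, (i:Int) < dInt →
        (pvLoopA C dInt fuel load)[i]? =
          if i < load.length then load[i]? else C[(i - load.length) % C.length]? := by
  intro fuel
  induction fuel with
  | zero =>
    intro load h i hi
    rw [pvLoopA, if_pos (by push_cast at h; omega)]
  | succ n ih =>
    intro load h i hi
    rw [Nat.succ_mul] at h
    rw [pvLoopA]
    split
    · rw [ih (load ++ C) (by simp only [List.length_append]; push_cast at h ⊢; omega) i hi]
      by_cases h1 : i < load.length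
      · rw [if_pos (by simp; omega), if_pos h1, List.getElem?_append_left h1]
      · rw [if_neg h1]
        by_cases h2 : i < load.length + C.length
        · rw [if_pos (by simp; omega), List.getElem?_append_right (by omega)]
          congr 1
          exact (Nat.mod_eq_of_lt (by omega)).symm
        · rw [if_neg (by simp; omega)]
          congr 1
          simp only [List.length_append]
          rw [Nat.mod_eq_sub_mod (a := i - load.length) (by omega)]
          congr 1
          omega
    · next hge => rw [if_pos (by omega)]

lemma pv_rep_append_getElem? (q s p : Nat) (x y : Int) (hp : p < q + s) :
    (List.replicate q x ++ List.replicate s y)[p]? = some (if p < q then x else y) := by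
  by_cases h : p < q
  · rw [List.getElem?_append_left (by simpa), if_pos h]
    simp [h]
  · rw [List.getElem?_append_right (by simpa using h), if_neg h]
    simp only [List.getElem?_replicate, List.length_replicate]
    rw [if_pos (by omega)]


lemma pv_slice_neg_length (xs : List Int) (d : Int) (hd : d < 0) :
    (PySem.List.slice xs none (some d)).length = xs.length - (-d).toNat := by
  rw [show (some d) = some (-((((-d).toNat : Nat)) : Int)) from by congr 1; omega,
    PySem.List.slice_to_neg_natCast _ _ (by omega)]
  simp only [List.length_take]
  omega
lemma pv_slice_neg_nil (xs : List Int) (d : Int) (hd : d < 0) (hlen : (xs.length : Int) ≤ -d) :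
    PySem.List.slice xs none (some d) = [] := by
  have hk : d = -((((-d).toNat : Nat)) : Int) := by omega
  rw [hk, PySem.List.slice_to_neg_natCast _ _ (by omega),
    Nat.sub_eq_zero_of_le (by omega), List.take_zero]

lemma pv_slice_nil (d : Int) : PySem.List.slice ([] : List Int) none (some d) = [] := by
  by_cases h : 0 ≤ d
  · rw [PySem.List.slice_to _ h]; simp
  · exact pv_slice_neg_nil _ _ (by omega) (by simp; omega)

theorem compute_load_schedule_spec : Claim_unchanged_compute_load_schedule := by
  intro pattern qps duration concurrency sd? sl? si? _ hPre hnD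
  by_cases hst : pattern = "steady"
  · simp [compute_load_schedule, compute_load_schedule_alt, hst]
  by_cases hsp : pattern = "spike"
  · subst hsp
    simp only [Pre_compute_load_schedule, if_neg hst] at hPre
    simp only [compute_load_schedule, compute_load_schedule_alt, String.reduceEq, reduceIte,
      PySem.List.pyRepeat_singleton]
    rw [if_pos trivial] at hPre
    by_cases hd : 0 ≤ duration
    · simp only [← Int.toNat_eq_max]
      rw [pv_spike_take]
      exact hd
    · push_neg at hd
      have hD' : 2 * max (PySem.Int.floordiv (duration - sd?.getD 0) 2) 0 + max (sd?.getD 0) 0 ≤ -duration := by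
        by_contra hlt
        push_neg at hlt
        exact hnD ⟨rfl, hd, hPre.1, hlt⟩
      rw [pv_slice_neg_nil _ _ hd
        (by simp only [List.length_append, List.length_replicate]; push_cast; omega)]
      rw [PySem.List.pyRange_one_eq_nil (by omega)]
      rfl
  by_cases hpe : pattern = "periodic"
  · subst hpe
    simp only [Pre_compute_load_schedule, String.reduceEq, reduceIte] at hPre
    simp only [compute_load_schedule, compute_load_schedule_alt, String.reduceEq, reduceIte,
      PySem.List.pyRepeat_singleton]
    by_cases hd0 : duration ≤ 0
    · rw [if_pos hd0]
      have ht0 : duration.toNat = 0 := by omega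
      rw [ht0]
      show PySem.List.slice (pvLoopA _ duration 0 []) none (some duration) = []
      rw [pvLoopA]
      exact pv_slice_nil duration
    · rw [if_neg hd0]
      push_neg at hd0
      rcases hPre with h | ⟨hsd, hsi, hcyc, _⟩
      · omega
      obtain ⟨sd, rfl⟩ := Option.isSome_iff_exists.mp hsd
      obtain ⟨si, rfl⟩ := Option.isSome_iff_exists.mp hsi
      simp only [Option.getD_some] at hcyc ⊢
      have hC : 0 < (List.replicate (si - sd).toNat qps ++
          List.replicate sd.toNat (sl?.getD 0)).length := by
        simp only [List.length_append, List.length_replicate]; omega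
      rw [PySem.List.slice_to _ (by omega)]
      have hb : duration ≤ (([] : List Int).length : Int) +
          ((duration.toNat * (List.replicate (si - sd).toNat qps ++
            List.replicate sd.toNat (sl?.getD 0)).length : Nat) : Int) := by
        have h1 := Nat.le_mul_of_pos_right duration.toNat hC
        simp only [List.length_nil]
        omega
      apply List.ext_getElem?
      intro i
      by_cases hi : (i : Int) < duration
      · rw [List.getElem?_take_of_lt (by omega),
          pvLoopA_getElem? _ hC duration duration.toNat [] hb i hi]
        rw [if_neg (by simp), List.length_nil, Nat.sub_zero]
        rw [pv_rep_append_getElem? _ _ _ _ _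
          (by simpa using Nat.mod_lt i hC)]
        rw [show duration = ((duration.toNat : Nat) : Int) from by omega,
          PySem.List.getElem?_map_pyRange_zero _ _ _ (by omega : i < duration.toNat)]
        congr 1
        have hcycpos : (0:Int) < max (si - sd) 0 + max sd 0 := by omega
        simp only [PySem.Int.mod_eq_emod_of_pos hcycpos]
        have h2 : (max (si - sd) 0 + max sd 0 : Int) =
            (((si - sd).toNat + sd.toNat : Nat) : Int) := by push_cast; omega
        have h3 : ((i:Int) % (max (si - sd) 0 + max sd 0)) =
            ((i % ((si - sd).toNat + sd.toNat) : Nat) : Int) := by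
          rw [h2]; push_cast; rfl
        rw [h3]
        simp only [List.length_append, List.length_replicate]
        have h4 : (max (si - sd) 0 : Int) = (((si - sd).toNat : Nat) : Int) := by omega
        rw [h4]
        norm_cast
      · rw [List.getElem?_eq_none (by
          have := List.length_take_le duration.toNat ((pvLoopA (List.replicate (si - sd).toNat qps ++
            List.replicate sd.toNat (sl?.getD 0)) duration duration.toNat []))
          omega)]
        rw [List.getElem?_eq_none (by
          simp only [List.length_map, PySem.List.length_pyRange_one]
          omega)]
  · simp only [Pre_compute_load_schedule] at hPre
    rw [if_neg hst, if_neg hsp, if_neg hpe] at hPre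
    exact hPre.elim

theorem compute_load_schedule_changed : Claim_changed_compute_load_schedule := by
  unfold Claim_changed_compute_load_schedule; decide

theorem compute_load_schedule_tight : Claim_exact_compute_load_schedule := by
  intro pattern qps duration concurrency sd? sl? si? _ hPre hD heq
  obtain ⟨hsp, hd, hsd, hT⟩ := hD
  subst hsp
  have hB : compute_load_schedule_alt "spike" qps duration concurrency sd? sl? si? = [] := by
    simp only [compute_load_schedule_alt, String.reduceEq, reduceIte]
    rw [PySem.List.pyRange_one_eq_nil (by omega)]
    rfl
  rw [hB] at heq
  have hA := congrArg List.length heq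
  simp only [compute_load_schedule, String.reduceEq, reduceIte,
    PySem.List.pyRepeat_singleton] at hA
  rw [pv_slice_neg_length _ _ hd] at hA
  simp only [List.length_append, List.length_replicate, List.length_nil] at hA
  omega
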